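-- pv_equiv track=rewrite | github.com/gimdongwon/Catch_python_tmi | Woojin/11th/search-lyric/solution.py | get_word_dict
-- ===== SOURCE A (Python) =====
-- from collections import defaultdict
-- from collections import defaultdict
-- from collections import defaultdict
-- from collections import defaultdict
-- from collections import defaultdict
--
-- def get_word_dict(words):
--     len_dict = defaultdict(list)
--
--     for word in words:
--             len_dict[len(word)].append(word)
--
--     len_dict = dict(len_dict)
--
--     for key, value in len_dict.items():
--         first_dict = defaultdict(list)
--         last_dict = defaultdict(list)
--
--         for v in value:
--             first_dict[v[0]].append(v)
--             last_dict[v[-1]].append(v)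
--
--         len_dict[key] = [first_dict, last_dict]
--
--     return len_dict
-- ===== SOURCE B (Python) =====
-- from collections import defaultdict
--
-- def get_word_dict(words):
--     # One fused pass: group by length and by first/last char simultaneously.
--     acc = {}
--     for w in words:
--         fd, ld = acc.setdefault(len(w), (defaultdict(list), defaultdict(list)))
--         fd[w[0]].append(w)
--         ld[w[-1]].append(w)
--     return {k: [fd, ld] for k, (fd, ld) in acc.items()}
-- ===== Notes on version B (the rewrite author's own statement) =====
-- stated objective: simpler
-- what changed: A builds a length->words dict in one loop and then, in a second loop over that dict, splits each bucket into first-char and last-char dicts; B is a single fused pass over the words that maintains the (first_dict, last_dict) pair per length as it goes.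
import Mathlib
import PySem

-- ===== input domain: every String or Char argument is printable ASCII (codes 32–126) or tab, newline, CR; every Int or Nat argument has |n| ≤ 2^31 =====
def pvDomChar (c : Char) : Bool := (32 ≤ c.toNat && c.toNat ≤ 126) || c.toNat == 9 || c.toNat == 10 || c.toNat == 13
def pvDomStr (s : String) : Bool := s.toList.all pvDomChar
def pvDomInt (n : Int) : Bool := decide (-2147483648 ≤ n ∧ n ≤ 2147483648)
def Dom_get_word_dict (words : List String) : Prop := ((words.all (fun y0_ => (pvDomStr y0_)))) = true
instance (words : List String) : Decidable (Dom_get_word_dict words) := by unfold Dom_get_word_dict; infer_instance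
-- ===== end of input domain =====

-- B fuses A's two phases (group by length, then split each bucket by first/last char)
-- into one pass over the words; objective: simpler one-pass decomposition, same cost.

-- ===== PORT A =====
-- w[0] / w[-1] as the one-character string Python yields; the "" default is only
-- reached on empty words, which Pre_ excludes (Python raises IndexError there).
def pvFirst (w : String) : String := ((PySem.Str.pyGet? w 0).map (fun c => String.ofList [c])).getD ""
def pvLast (w : String) : String := ((PySem.Str.pyGet? w (-1)).map (fun c => String.ofList [c])).getD ""

-- the body of A's second loop: builds [first_dict, last_dict] for one length-bucket
def pvInner (v : List String) :
    PySem.Dict String (List String) × PySem.Dict String (List String) :=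
  v.foldl (fun p w =>
      (p.1.modify (pvFirst w) [] (fun l => l ++ [w]),
       p.2.modify (pvLast w) [] (fun l => l ++ [w])))
    (PySem.Dict.empty, PySem.Dict.empty)

def get_word_dict (words : List String) : List (Int × List (List (String × List String))) :=
  let len_dict : PySem.Dict Int (List String) :=
    words.foldl (fun d w => d.modify (PySem.Str.len w) [] (fun l => l ++ [w]))
      PySem.Dict.empty
  len_dict.items.map (fun kv => (kv.1, [(pvInner kv.2).1.items, (pvInner kv.2).2.items]))

-- ===== PORT B =====
def get_word_dict_alt (words : List String) : List (Int × List (List (String × List String))) :=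
  let acc : PySem.Dict Int (PySem.Dict String (List String) × PySem.Dict String (List String)) :=
    words.foldl (fun d w =>
        d.modify (PySem.Str.len w) (PySem.Dict.empty, PySem.Dict.empty)
          (fun p => (p.1.modify (pvFirst w) [] (fun l => l ++ [w]),
                     p.2.modify (pvLast w) [] (fun l => l ++ [w]))))
      PySem.Dict.empty
  acc.items.map (fun kv => (kv.1, [kv.2.1.items, kv.2.2.items]))

-- ===== PRECONDITION & SPEC =====
-- Pre_ excludes lists containing an empty word, on which Python A raises IndexError (word[0]).
def Pre_get_word_dict (words : List String) : Prop := ∀ w ∈ words, w ≠ ""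
instance (words : List String) : Decidable (Pre_get_word_dict words) := by unfold Pre_get_word_dict; infer_instance

def pvWitness_get_word_dict : List String := ["ab", "cd", "x", "ba"]

def Spec_get_word_dict (words : List String) (out : List (Int × List (List (String × List String)))) : Prop := out = get_word_dict_alt words
instance (words : List String) (out : List (Int × List (List (String × List String)))) : Decidable (Spec_get_word_dict words out) := by unfold Spec_get_word_dict; infer_instance

-- ===== CLAIM (what is proved, stated in full; the proofs are below) =====
def Claim_equal_get_word_dict : Prop := ∀ (words : List String), Dom_get_word_dict words → Pre_get_word_dict words → Spec_get_word_dict words (get_word_dict words)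

-- ===== LEMMAS AND PROOFS =====

-- map pvInner over the values of a length-bucket dict
def pvVMap (d : PySem.Dict Int (List String)) :
    PySem.Dict Int (PySem.Dict String (List String) × PySem.Dict String (List String)) :=
  PySem.Dict.mk (d.items.map (fun kv => (kv.1, pvInner kv.2)))

theorem pvInner_append (v : List String) (w : String) :
    pvInner (v ++ [w]) =
      ((pvInner v).1.modify (pvFirst w) [] (fun l => l ++ [w]),
       (pvInner v).2.modify (pvLast w) [] (fun l => l ++ [w])) := by
  simp [pvInner, List.foldl_append]

theorem pvVMap_get? (d : PySem.Dict Int (List String)) (k : Int) :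
    (pvVMap d).get? k = (d.get? k).map pvInner := by
  obtain ⟨l⟩ := d
  induction l with
  | nil => rfl
  | cons p rest ih =>
    simp only [pvVMap, PySem.Dict.get?, List.map_cons, List.find?] at *
    by_cases h : p.1 == k
    · simp [h]
    · simp only [h]
      simpa using ih

theorem pvVMap_contains (d : PySem.Dict Int (List String)) (k : Int) :
    (pvVMap d).contains k = d.contains k := by
  simp [pvVMap, PySem.Dict.contains, List.any_map, Function.comp_def]

theorem pvVMap_insert (d : PySem.Dict Int (List String)) (k : Int) (v : List String) :
    (pvVMap d).insert k (pvInner v) = pvVMap (d.insert k v) := by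
  by_cases h : d.contains k
  · simp only [PySem.Dict.insert, pvVMap_contains, h, if_true]
    simp only [pvVMap, List.map_map]
    congr 1
    apply List.map_congr_left
    intro kv _
    by_cases hk : kv.1 == k <;> simp [Function.comp, hk]
  · simp only [PySem.Dict.insert, pvVMap_contains, h]
    simp [pvVMap]

theorem pvVMap_modify (d : PySem.Dict Int (List String)) (k : Int) (w : String) :
    (pvVMap d).modify k (PySem.Dict.empty, PySem.Dict.empty)
        (fun p => (p.1.modify (pvFirst w) [] (fun l => l ++ [w]),
                   p.2.modify (pvLast w) [] (fun l => l ++ [w])))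
      = pvVMap (d.modify k [] (fun l => l ++ [w])) := by
  have hgetD : (pvVMap d).getD k (PySem.Dict.empty, PySem.Dict.empty)
      = pvInner (d.getD k []) := by
    simp only [PySem.Dict.getD, pvVMap_get?]
    cases d.get? k with
    | none => rfl
    | some v => rfl
  show (pvVMap d).insert k _ = pvVMap (d.insert k _)
  beta_reduce
  rw [hgetD, ← pvInner_append, pvVMap_insert]

theorem pvFold_invariant (ws : List String) (d : PySem.Dict Int (List String)) :
    ws.foldl (fun d w =>
        d.modify (PySem.Str.len w) (PySem.Dict.empty, PySem.Dict.empty)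
          (fun p => (p.1.modify (pvFirst w) [] (fun l => l ++ [w]),
                     p.2.modify (pvLast w) [] (fun l => l ++ [w])))) (pvVMap d)
    = pvVMap (ws.foldl (fun d w => d.modify (PySem.Str.len w) [] (fun l => l ++ [w])) d) := by
  induction ws generalizing d with
  | nil => rfl
  | cons w ws ih => simp only [List.foldl_cons, pvVMap_modify, ih]

-- ===== VERDICT (by name: the statement is the Claim_ definition above) =====
theorem get_word_dict_spec : Claim_equal_get_word_dict := by
  intro words _ _
  unfold Spec_get_word_dict get_word_dict get_word_dict_alt
  have h := pvFold_invariant words (PySem.Dict.mk [])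
  have he : pvVMap (PySem.Dict.mk []) = (PySem.Dict.empty :
      PySem.Dict Int (PySem.Dict String (List String) × PySem.Dict String (List String))) := rfl
  have he2 : (PySem.Dict.empty : PySem.Dict Int (List String)) = PySem.Dict.mk [] := rfl
  rw [he2, ← he, h]
  simp [pvVMap]
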